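-- pv_equiv track=rewrite | github.com/Ry4nW/python-wars | binarysearch/swapConsecutiveIndexPairs.py | solve
-- ===== SOURCE A (Python) =====
-- def solve(nums):
--
--     for i in range(2, len(nums), 4):
--
--         try:
--             holder = nums[i]
--             nums[i] = nums[i - 2]
--             nums[i - 2] = holder
--         except:
--             break
--
--     for i in range(1, len(nums), 4):
--
--         try:
--             holder = nums[i]
--             nums[i] = nums[i + 2]
--             nums[i + 2] = holder
--         except:
--             break
--
--     return nums
-- ===== SOURCE B (Python) =====
-- def solve(nums):
--     # Return-value equivalent to A (A swaps in place and returns the same list;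
--     # this builds a fresh list): single walk over 4-element chunks, each full
--     # chunk [a,b,c,d] is emitted as [c,d,a,b]; a trailing 3-chunk as [c,b,a].
--     out = []
--     n = len(nums)
--     i = 0
--     while n - i >= 4:
--         out += [nums[i + 2], nums[i + 3], nums[i], nums[i + 1]]
--         i += 4
--     if n - i == 3:
--         out += [nums[i + 2], nums[i + 1], nums[i]]
--     else:
--         out += nums[i:]
--     return out
-- ===== Notes on version B (the rewrite author's own statement) =====
-- stated objective: simpler
-- what changed: A runs two separate strided in-place swap passes (for i in range(2,len,4) and range(1,len,4)) with try/except-break; B is a single forward walk over 4-element chunks that emits each full chunk [a,b,c,d] as [c,d,a,b] (and a trailing 3-chunk as [c,b,a]) into a fresh output list.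
import Mathlib
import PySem

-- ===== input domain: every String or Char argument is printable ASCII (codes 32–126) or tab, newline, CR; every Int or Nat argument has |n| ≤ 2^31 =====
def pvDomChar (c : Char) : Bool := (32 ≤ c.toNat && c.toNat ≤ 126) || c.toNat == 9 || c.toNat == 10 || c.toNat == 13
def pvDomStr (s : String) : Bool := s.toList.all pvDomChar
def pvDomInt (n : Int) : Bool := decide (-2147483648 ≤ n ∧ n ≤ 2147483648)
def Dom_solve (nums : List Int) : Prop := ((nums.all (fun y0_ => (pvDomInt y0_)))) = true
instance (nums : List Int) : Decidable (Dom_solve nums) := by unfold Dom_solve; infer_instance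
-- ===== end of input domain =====

-- B replaces A's two strided index passes by one simpler recursive 4-chunk walk; equivalence is about
-- the RETURN value only (A mutates nums in place and returns it; B builds a fresh list).

-- ===== PORT A =====
-- the try-block of A's first loop: holder = nums[i]; nums[i] = nums[i-2]; nums[i-2] = holder
def tryBlock1 (l : List Int) (i : Int) : Option (List Int) :=
  (PySem.List.pyGet? l i).bind fun holder =>
  (PySem.List.pyGet? l (i - 2)).bind fun v =>
  (PySem.List.pySet? l i v).bind fun l1 =>
  PySem.List.pySet? l1 (i - 2) holder

-- the try-block of A's second loop: holder = nums[i]; nums[i] = nums[i+2]; nums[i+2] = holder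
def tryBlock2 (l : List Int) (i : Int) : Option (List Int) :=
  (PySem.List.pyGet? l i).bind fun holder =>
  (PySem.List.pyGet? l (i + 2)).bind fun v =>
  (PySem.List.pySet? l i v).bind fun l1 =>
  PySem.List.pySet? l1 (i + 2) holder

-- 'for i in range(2, len(nums), 4): try … except: break'
def solveLoop1 : List Int → List Int → List Int
  | l, [] => l
  | l, i :: is =>
    match tryBlock1 l i with
    | some l' => solveLoop1 l' is
    | none => l

-- 'for i in range(1, len(nums), 4): try … except: break'
def solveLoop2 : List Int → List Int → List Int
  | l, [] => l
  | l, i :: is =>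
    match tryBlock2 l i with
    | some l' => solveLoop2 l' is
    | none => l

def solve (nums : List Int) : List Int :=
  solveLoop2 (solveLoop1 nums (PySem.List.pyRange 2 (nums.length : Int) 4))
             (PySem.List.pyRange 1 (nums.length : Int) 4)

-- ===== PORT B =====
-- 'while n - i >= 4: out += [nums[i+2], nums[i+3], nums[i], nums[i+1]]; i += 4' then the tail
def solveAltLoop (nums : List Int) (n : Int) (acc : List Int) (i : Int) : List Int :=
  if 4 ≤ n - i then
    solveAltLoop nums n
      (acc ++ [PySem.List.pyGetD nums (i + 2) 0, PySem.List.pyGetD nums (i + 3) 0,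
               PySem.List.pyGetD nums i 0, PySem.List.pyGetD nums (i + 1) 0]) (i + 4)
  else if n - i = 3 then
    acc ++ [PySem.List.pyGetD nums (i + 2) 0, PySem.List.pyGetD nums (i + 1) 0,
            PySem.List.pyGetD nums i 0]
  else
    acc ++ PySem.List.slice nums (some i) none
termination_by (n - i).toNat
decreasing_by omega

def solve_alt (nums : List Int) : List Int :=
  solveAltLoop nums (nums.length : Int) [] 0

-- ===== PRECONDITION & SPEC =====
def Spec_solve (nums : List Int) (out : List Int) : Prop := out = solve_alt nums
instance (nums : List Int) (out : List Int) : Decidable (Spec_solve nums out) := by unfold Spec_solve; infer_instance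

-- ===== CLAIM (what is proved, stated in full; the proofs are below) =====
def Claim_equal_solve : Prop := ∀ (nums : List Int), Dom_solve nums → Spec_solve nums (solve nums)

-- ===== LEMMAS AND PROOFS =====

-- proof-side characterisation both ports are reduced to: the 4-chunk transform
def chunkF : List Int → List Int
  | a :: b :: c :: d :: rest => c :: d :: a :: b :: chunkF rest
  | [a, b, c] => [c, b, a]
  | l => l

lemma getD_drop (nums t : List Int) (i : Int) (j : Nat) (h0 : 0 ≤ i)
    (hd : nums.drop i.toNat = t) (hj : j < t.length) :
    PySem.List.pyGetD nums (i + (j : Int)) 0 = t[j] := by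
  have hlt : i.toNat + j < nums.length := by
    have := List.length_drop (l := nums) (i := i.toNat)
    rw [hd] at this
    omega
  rw [PySem.List.pyGetD_eq_getElem nums 0 (by omega) (by omega)]
  subst hd
  rw [List.getElem_drop]
  congr 1
  omega

lemma solveAltLoop_eq_chunkF (nums : List Int) :
    ∀ (t : List Int) (i : Int) (acc : List Int), 0 ≤ i → i.toNat ≤ nums.length →
      nums.drop i.toNat = t → solveAltLoop nums (nums.length : Int) acc i = acc ++ chunkF t
  | a :: b :: c :: d :: rest, i, acc, h0, hle, hd => by
    have hl : (a :: b :: c :: d :: rest).length = nums.length - i.toNat := by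
      rw [← hd, List.length_drop]
    have hn4 : 4 ≤ (nums.length : Int) - i := by simp at hl; omega
    have g0 := getD_drop nums _ i 0 h0 hd (by simp)
    have g1 := getD_drop nums _ i 1 h0 hd (by simp)
    have g2 := getD_drop nums _ i 2 h0 hd (by simp)
    have g3 := getD_drop nums _ i 3 h0 hd (by simp)
    push_cast at g0 g1 g2 g3
    simp only [add_zero] at g0
    rw [solveAltLoop, if_pos hn4, g0, g1, g2, g3]
    have hd' : nums.drop (i + 4).toNat = rest := by
      have : (i + 4).toNat = i.toNat + 4 := by omega
      rw [this, ← List.drop_drop, hd]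
      rfl
    rw [solveAltLoop_eq_chunkF nums rest (i + 4) _ (by omega) (by simp at hl; omega) hd']
    simp [chunkF]
  | [a, b, c], i, acc, h0, hle, hd => by
    have hl : ([a, b, c] : List Int).length = nums.length - i.toNat := by
      rw [← hd, List.length_drop]
    have hn4 : ¬ 4 ≤ (nums.length : Int) - i := by simp at hl; omega
    have hn3 : (nums.length : Int) - i = 3 := by simp at hl; omega
    have g0 := getD_drop nums _ i 0 h0 hd (by simp)
    have g1 := getD_drop nums _ i 1 h0 hd (by simp)
    have g2 := getD_drop nums _ i 2 h0 hd (by simp)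
    push_cast at g0 g1 g2
    simp only [add_zero] at g0
    rw [solveAltLoop, if_neg hn4, if_pos hn3, g0, g1, g2]
    rfl
  | [], i, acc, h0, hle, hd => by
    have hl : ([] : List Int).length = nums.length - i.toNat := by
      rw [← hd, List.length_drop]
    have hn4 : ¬ 4 ≤ (nums.length : Int) - i := by simp at hl; omega
    have hn3 : ¬ (nums.length : Int) - i = 3 := by simp at hl; omega
    rw [solveAltLoop, if_neg hn4, if_neg hn3, PySem.List.slice_from nums h0, hd]
    rfl
  | [a], i, acc, h0, hle, hd => by
    have hl : ([a] : List Int).length = nums.length - i.toNat := by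
      rw [← hd, List.length_drop]
    have hn4 : ¬ 4 ≤ (nums.length : Int) - i := by simp at hl; omega
    have hn3 : ¬ (nums.length : Int) - i = 3 := by simp at hl; omega
    rw [solveAltLoop, if_neg hn4, if_neg hn3, PySem.List.slice_from nums h0, hd]
    rfl
  | [a, b], i, acc, h0, hle, hd => by
    have hl : ([a, b] : List Int).length = nums.length - i.toNat := by
      rw [← hd, List.length_drop]
    have hn4 : ¬ 4 ≤ (nums.length : Int) - i := by simp at hl; omega
    have hn3 : ¬ (nums.length : Int) - i = 3 := by simp at hl; omega
    rw [solveAltLoop, if_neg hn4, if_neg hn3, PySem.List.slice_from nums h0, hd]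
    rfl

lemma solve_alt_eq_chunkF (nums : List Int) : solve_alt nums = chunkF nums := by
  unfold solve_alt
  rw [solveAltLoop_eq_chunkF nums nums 0 [] le_rfl (by simp) (by simp)]
  rfl

lemma pyIdx?_shift4 (n : Nat) (i : Int) (h : 0 ≤ i) :
    PySem.List.pyIdx? (n + 4) (i + 4) = (PySem.List.pyIdx? n i).map (· + 4) := by
  unfold PySem.List.pyIdx?
  rw [if_pos h, if_pos (by omega : (0:Int) ≤ i + 4)]
  by_cases hlt : i < (n : Int)
  · rw [if_pos hlt, if_pos (by omega)]
    simp only [Option.map_some]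
    congr 1
    omega
  · rw [if_neg hlt, if_neg (by omega)]
    simp

lemma pyGet?_shift4 (w x y z : Int) (l : List Int) (i : Int) (h : 0 ≤ i) :
    PySem.List.pyGet? (w :: x :: y :: z :: l) (i + 4) = PySem.List.pyGet? l i := by
  simp only [PySem.List.pyGet?, List.length_cons]
  have e : l.length + 1 + 1 + 1 + 1 = l.length + 4 := by omega
  rw [e, pyIdx?_shift4 _ _ h]
  cases PySem.List.pyIdx? l.length i <;> simp

lemma pySet?_shift4 (w x y z : Int) (l : List Int) (i : Int) (v : Int) (h : 0 ≤ i) :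
    PySem.List.pySet? (w :: x :: y :: z :: l) (i + 4) v
      = (PySem.List.pySet? l i v).map (fun t => w :: x :: y :: z :: t) := by
  simp only [PySem.List.pySet?, List.length_cons]
  have e : l.length + 1 + 1 + 1 + 1 = l.length + 4 := by omega
  rw [e, pyIdx?_shift4 _ _ h]
  cases PySem.List.pyIdx? l.length i <;> simp

lemma tryBlock1_shift (w x y z : Int) (l : List Int) (i : Int) (h : 2 ≤ i) :
    tryBlock1 (w :: x :: y :: z :: l) (i + 4)
      = (tryBlock1 l i).map (fun t => w :: x :: y :: z :: t) := by
  have h0 : (0:Int) ≤ i := by omega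
  have h2 : (0:Int) ≤ i - 2 := by omega
  have e2 : i + 4 - 2 = (i - 2) + 4 := by omega
  simp only [tryBlock1, e2, pyGet?_shift4 _ _ _ _ _ _ h0, pyGet?_shift4 _ _ _ _ _ _ h2,
    pySet?_shift4 _ _ _ _ _ _ _ h0]
  cases PySem.List.pyGet? l i <;> simp
  cases PySem.List.pyGet? l (i - 2) <;> simp
  cases PySem.List.pySet? l i _ <;>
    simp [pySet?_shift4 _ _ _ _ _ _ _ h2]

lemma tryBlock2_shift (w x y z : Int) (l : List Int) (i : Int) (h : 1 ≤ i) :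
    tryBlock2 (w :: x :: y :: z :: l) (i + 4)
      = (tryBlock2 l i).map (fun t => w :: x :: y :: z :: t) := by
  have h0 : (0:Int) ≤ i := by omega
  have h2 : (0:Int) ≤ i + 2 := by omega
  have e2 : i + 4 + 2 = (i + 2) + 4 := by omega
  simp only [tryBlock2, e2, pyGet?_shift4 _ _ _ _ _ _ h0, pyGet?_shift4 _ _ _ _ _ _ h2,
    pySet?_shift4 _ _ _ _ _ _ _ h0]
  cases PySem.List.pyGet? l i <;> simp
  cases PySem.List.pyGet? l (i + 2) <;> simp
  cases PySem.List.pySet? l i _ <;>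
    simp [pySet?_shift4 _ _ _ _ _ _ _ h2]

lemma solveLoop1_shift (w x y z : Int) (is : List Int) :
    ∀ l, (∀ i ∈ is, 2 ≤ i) →
      solveLoop1 (w :: x :: y :: z :: l) (is.map (· + 4)) = w :: x :: y :: z :: solveLoop1 l is := by
  induction is with
  | nil => intro l _; simp [solveLoop1]
  | cons i is ih =>
    intro l h
    have hi : 2 ≤ i := h i (by simp)
    simp only [List.map_cons, solveLoop1, tryBlock1_shift _ _ _ _ _ _ hi]
    cases htb : tryBlock1 l i with
    | none => simp
    | some l' => simpa using ih l' (fun j hj => h j (by simp [hj]))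

lemma solveLoop2_shift (w x y z : Int) (is : List Int) :
    ∀ l, (∀ i ∈ is, 1 ≤ i) →
      solveLoop2 (w :: x :: y :: z :: l) (is.map (· + 4)) = w :: x :: y :: z :: solveLoop2 l is := by
  induction is with
  | nil => intro l _; simp [solveLoop2]
  | cons i is ih =>
    intro l h
    have hi : 1 ≤ i := h i (by simp)
    simp only [List.map_cons, solveLoop2, tryBlock2_shift _ _ _ _ _ _ hi]
    cases htb : tryBlock2 l i with
    | none => simp
    | some l' => simpa using ih l' (fun j hj => h j (by simp [hj]))

-- a step-4 range peeled as 'first index, then the shifted range of the 4-shorter bound'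
lemma pyRange4_cons (a n : Int) (h : a < n) :
    PySem.List.pyRange a n 4 = a :: (PySem.List.pyRange a (n - 4) 4).map (· + 4) := by
  rw [PySem.List.pyRange_of_pos a n (by norm_num), PySem.List.pyRange_of_pos a (n-4) (by norm_num)]
  rw [if_pos h]
  by_cases h2 : a < n - 4
  · rw [if_pos h2]
    have hc : ((n - a + 4 - 1) / 4).toNat = ((n - 4 - a + 4 - 1) / 4).toNat + 1 := by omega
    rw [hc, List.range_succ_eq_map]
    simp only [List.map_cons, List.map_map]
    refine List.cons_eq_cons.mpr ⟨by norm_num, ?_⟩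
    apply List.map_congr_left
    intro k _
    simp [Function.comp]
    ring
  · rw [if_neg h2]
    have hc : ((n - a + 4 - 1) / 4).toNat = 1 := by omega
    rw [hc]
    simp [List.range_succ]

lemma mem_pyRange4_le (a n i : Int) (h : i ∈ PySem.List.pyRange a n 4) : a ≤ i :=
  ((PySem.List.mem_pyRange_iff_of_pos (by norm_num) i).mp h).1

lemma solve_cons4 (a b c d : Int) (rest : List Int) :
    solve (a :: b :: c :: d :: rest) = c :: d :: a :: b :: solve rest := by
  have hlen : (((a :: b :: c :: d :: rest).length : Nat) : Int) = (rest.length : Int) + 4 := by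
    simp; omega
  have hsub : ((rest.length : Int) + 4) - 4 = (rest.length : Int) := by omega
  have htb1 : tryBlock1 (a :: b :: c :: d :: rest) 2 = some (c :: b :: a :: d :: rest) := by
    simp only [tryBlock1, PySem.List.pyGet?, PySem.List.pySet?, PySem.List.pyIdx?, List.length_cons]
    split_ifs <;> simp_all <;> omega
  have htb2 : ∀ X : List Int, tryBlock2 (c :: b :: a :: d :: X) 1 = some (c :: d :: a :: b :: X) := by
    intro X
    simp only [tryBlock2, PySem.List.pyGet?, PySem.List.pySet?, PySem.List.pyIdx?, List.length_cons]
    split_ifs <;> simp_all <;> omega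
  unfold solve
  rw [hlen, pyRange4_cons 2 _ (by omega), pyRange4_cons 1 _ (by omega), hsub]
  simp only [solveLoop1, htb1]
  rw [solveLoop1_shift _ _ _ _ _ _ (fun i hi => mem_pyRange4_le _ _ _ hi)]
  simp only [solveLoop2, htb2]
  rw [solveLoop2_shift _ _ _ _ _ _ (fun i hi => mem_pyRange4_le _ _ _ hi)]

lemma solve_eq_chunkF : ∀ l : List Int, solve l = chunkF l
  | a :: b :: c :: d :: rest => by
    rw [solve_cons4, solve_eq_chunkF rest]
    simp [chunkF]
  | [a, b, c] => by
    have h2 : PySem.List.pyRange 2 (3:Int) 4 = [2] := by decide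
    have h1 : PySem.List.pyRange 1 (3:Int) 4 = [1] := by decide
    simp only [solve, List.length_cons, List.length_nil]
    norm_num [h1, h2]
    simp only [solveLoop1, solveLoop2, tryBlock1, tryBlock2,
      PySem.List.pyGet?, PySem.List.pySet?, PySem.List.pyIdx?]
    norm_num
    rfl
  | [a, b] => by
    have h2 : PySem.List.pyRange 2 (2:Int) 4 = [] := by decide
    have h1 : PySem.List.pyRange 1 (2:Int) 4 = [1] := by decide
    simp only [solve, List.length_cons, List.length_nil]
    norm_num [h1, h2]
    simp only [solveLoop1, solveLoop2, tryBlock2,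
      PySem.List.pyGet?, PySem.List.pySet?, PySem.List.pyIdx?]
    norm_num
    simp [chunkF]
  | [a] => by
    have h2 : PySem.List.pyRange 2 (1:Int) 4 = [] := by decide
    have h1 : PySem.List.pyRange 1 (1:Int) 4 = [] := by decide
    simp only [solve, List.length_cons, List.length_nil]
    norm_num [h1, h2]
    simp [solveLoop1, solveLoop2, chunkF]
  | [] => by decide

-- ===== VERDICT (by name: the statement is the Claim_ definition above) =====
theorem solve_spec : Claim_equal_solve := by
  intro nums _
  unfold Spec_solve
  rw [solve_eq_chunkF nums, solve_alt_eq_chunkF nums]
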